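-- pv_equiv track=rewrite | github.com/le-fb/adventOfCode2022 | tim/17/day17p2.py | cut_matrix
-- ===== SOURCE A (Python) =====
-- def cut_matrix(matrix):
--     # cutoff empty rows for better printing
--     new_matrix = []
--     start_found = False
--     for line in matrix:
--         if all(tile == "." for tile in line) and not start_found:
--             continue
--         start_found = True
--         new_matrix.append(line)
--     return new_matrix
-- ===== SOURCE B (Python) =====
-- def cut_matrix(matrix):
--     # find index of first non-empty row, default len(matrix); then slice
--     index = next((i for i, line in enumerate(matrix) if any(tile != "." for tile in line)), len(matrix))
--     return matrix[index:]
-- ===== Notes on version B (the rewrite author's own statement) =====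
-- stated objective: simpler
-- what changed: Replaces the append-loop with a start_found flag by finding the index of the first non-empty row and returning matrix[index:] directly.
import Mathlib
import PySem

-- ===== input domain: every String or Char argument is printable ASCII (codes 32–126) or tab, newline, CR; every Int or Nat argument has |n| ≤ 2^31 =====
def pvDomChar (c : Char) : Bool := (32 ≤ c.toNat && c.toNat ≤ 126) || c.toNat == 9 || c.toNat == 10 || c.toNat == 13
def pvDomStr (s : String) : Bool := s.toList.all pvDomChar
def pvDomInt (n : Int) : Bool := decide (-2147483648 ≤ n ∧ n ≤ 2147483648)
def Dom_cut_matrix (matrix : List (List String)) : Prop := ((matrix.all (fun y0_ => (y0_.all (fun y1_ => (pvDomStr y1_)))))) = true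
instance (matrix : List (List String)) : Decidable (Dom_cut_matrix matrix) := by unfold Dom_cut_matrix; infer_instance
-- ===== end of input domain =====

-- B strips leading all-"." rows by computing the first non-empty row index and slicing,
-- instead of A's rebuild-with-flag append loop (objective: simpler).


-- ===== PORT A =====
-- state: (new_matrix, start_found); one step of A's loop body
def cutStep (st : List (List String) × Bool) (line : List String) :
    List (List String) × Bool :=
  if (line.all (fun tile => tile == ".")) && !st.2 then st
  else (st.1 ++ [line], true)

def cut_matrix (matrix : List (List String)) : List (List String) :=
  (matrix.foldl cutStep ([], false)).1

-- ===== PORT B =====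
-- index of the first row containing a tile ≠ "." (len(matrix) if none)
def firstNonEmptyIdx : List (List String) → Nat
  | [] => 0
  | line :: rest =>
      if line.any (fun tile => tile != ".") then 0 else 1 + firstNonEmptyIdx rest

def cut_matrix_alt (matrix : List (List String)) : List (List String) :=
  matrix.drop (firstNonEmptyIdx matrix)

-- ===== PRECONDITION & SPEC =====
def Spec_cut_matrix (matrix : List (List String)) (out : List (List String)) : Prop := out = cut_matrix_alt matrix
instance (matrix : List (List String)) (out : List (List String)) : Decidable (Spec_cut_matrix matrix out) := by unfold Spec_cut_matrix; infer_instance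

-- ===== CLAIM (what is proved, stated in full; the proofs are below) =====
def Claim_equal_cut_matrix : Prop := ∀ (matrix : List (List String)), Dom_cut_matrix matrix → Spec_cut_matrix matrix (cut_matrix matrix)

-- ===== LEMMAS AND PROOFS =====
-- once start_found is true, the loop appends every remaining line
theorem cut_foldl_true (l : List (List String)) (acc : List (List String)) :
    (l.foldl cutStep (acc, true)).1 = acc ++ l := by
  induction l generalizing acc with
  | nil => simp
  | cons x xs ih =>
      simp [List.foldl, cutStep, ih]

theorem cut_foldl_false (l : List (List String)) (acc : List (List String)) :
    (l.foldl cutStep (acc, false)).1 = acc ++ l.drop (firstNonEmptyIdx l) := by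
  induction l generalizing acc with
  | nil => simp
  | cons x xs ih =>
      by_cases h : x.all (fun tile => tile == ".")
      · have hany : x.any (fun tile => tile != ".") = false := by
          simpa using h
        simp [List.foldl, cutStep, h, hany, firstNonEmptyIdx, Nat.add_comm 1, ih]
      · have hany : x.any (fun tile => tile != ".") = true := by
          simpa using h
        simp [List.foldl, cutStep, h, firstNonEmptyIdx, hany, cut_foldl_true]

-- ===== VERDICT (by name: the statement is the Claim_ definition above) =====
theorem cut_matrix_spec : Claim_equal_cut_matrix := by
  intro matrix _
  show cut_matrix matrix = cut_matrix_alt matrix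
  simpa [cut_matrix, cut_matrix_alt] using cut_foldl_false matrix []
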